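-- pv_equiv track=rewrite | github.com/collinsakenga/codewars_solutions | 6 kyu/Change it up.py | changer
-- ===== SOURCE A (Python) =====
-- def changer(string):
--     res=""
--     for i in string:
--         if not i.isalpha():
--             res+=i
--         else:
--             temp="a" if i=="z" else "A" if i=="Z" else chr(ord(i)+1)
--             res+=temp.upper() if temp in "aeiouAEIOU" else temp.lower()
--     return res
-- ===== SOURCE B (Python) =====
-- def changer(string):
--     # Precompute a 52-entry translation table once (both cases of a letter map to
--     # the same output char), then translate in one pass; non-letters fall through.
--     table = {}
--     for i in range(26):
--         nxt = (i + 1) % 26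
--         dst = chr(65 + nxt) if nxt in (0, 4, 8, 14, 20) else chr(97 + nxt)
--         table[chr(65 + i)] = dst
--         table[chr(97 + i)] = dst
--     return string.translate(str.maketrans(table))
-- ===== Notes on version B (the rewrite author's own statement) =====
-- stated objective: faster
-- what changed: B precomputes a 52-entry char->char translation table once via modular letter-index arithmetic (case-collapsed: both cases of a letter share one entry) and applies str.translate in one C-level pass, instead of A's per-character branch chain with repeated string concatenation.
import Mathlib
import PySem

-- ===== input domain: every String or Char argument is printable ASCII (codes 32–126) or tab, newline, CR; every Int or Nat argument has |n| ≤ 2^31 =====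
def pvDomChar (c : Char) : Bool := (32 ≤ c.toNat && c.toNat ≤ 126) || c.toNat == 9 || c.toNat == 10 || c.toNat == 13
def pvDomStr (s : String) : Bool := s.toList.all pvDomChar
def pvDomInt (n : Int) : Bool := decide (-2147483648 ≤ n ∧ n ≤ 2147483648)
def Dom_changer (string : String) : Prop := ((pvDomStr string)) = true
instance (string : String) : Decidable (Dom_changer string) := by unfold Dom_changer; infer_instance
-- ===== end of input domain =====

-- B builds a char->char translation table once and translates; equivalence with A proved on Dom.

-- ===== PORT A =====
def changer (string : String) : String :=
  String.mk (string.toList.foldl (fun res i =>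
    if ¬ PySem.Chars.isalpha i then
      res ++ [i]
    else
      let temp := if i = 'z' then 'a' else if i = 'Z' then 'A' else Char.ofNat (i.toNat + 1)
      res ++ [if PySem.Chars.isIn [temp] "aeiouAEIOU".toList then
                PySem.Chars.upperChar temp else PySem.Chars.lowerChar temp]) [])

-- ===== PORT B =====
-- the translation table of Source B: fold over range(26), two inserts per letter index
def changerTable : PySem.Dict Char Char :=
  (PySem.List.pyRange 0 26 1).foldl (fun t i =>
    let nxt := PySem.Int.mod (i + 1) 26
    let dst := if nxt = 0 ∨ nxt = 4 ∨ nxt = 8 ∨ nxt = 14 ∨ nxt = 20 then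
                 Char.ofNat (65 + nxt).toNat else Char.ofNat (97 + nxt).toNat
    (t.insert (Char.ofNat (65 + i).toNat) dst).insert (Char.ofNat (97 + i).toNat) dst)
    (PySem.Dict.empty)

def changer_alt (string : String) : String :=
  -- str.translate: chars absent from the table pass through unchanged
  String.mk (string.toList.map (fun c => changerTable.getD c c))

-- ===== PRECONDITION & SPEC =====
def Spec_changer (string : String) (out : String) : Prop := out = changer_alt string
instance (string : String) (out : String) : Decidable (Spec_changer string out) := by unfold Spec_changer; infer_instance

-- ===== CLAIM (what is proved, stated in full; the proofs are below) =====
def Claim_equal_changer : Prop := ∀ (string : String), Dom_changer string → Spec_changer string (changer string)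

-- ===== LEMMAS AND PROOFS =====

-- A's per-character output
def aChar (i : Char) : Char :=
  if ¬ PySem.Chars.isalpha i then i
  else
    let temp := if i = 'z' then 'a' else if i = 'Z' then 'A' else Char.ofNat (i.toNat + 1)
    if PySem.Chars.isIn [temp] "aeiouAEIOU".toList then
      PySem.Chars.upperChar temp else PySem.Chars.lowerChar temp

set_option maxRecDepth 4000 in
theorem aChar_eq_bChar : ∀ n, n < 127 →
    aChar (Char.ofNat n) = changerTable.getD (Char.ofNat n) (Char.ofNat n) := by
  decide

theorem dom_char_eq (c : Char) (h : pvDomChar c = true) :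
    aChar c = changerTable.getD c c := by
  have hlt : c.toNat < 127 := by
    simp only [pvDomChar, Bool.or_eq_true, Bool.and_eq_true, decide_eq_true_eq,
      beq_iff_eq] at h
    omega
  have hc : Char.ofNat c.toNat = c := Char.ofNat_toNat c
  have := aChar_eq_bChar c.toNat hlt
  rwa [hc] at this

theorem changer_eq_map (l : List Char) :
    l.foldl (fun res i =>
      if ¬ PySem.Chars.isalpha i then
        res ++ [i]
      else
        let temp := if i = 'z' then 'a' else if i = 'Z' then 'A' else Char.ofNat (i.toNat + 1)
        res ++ [if PySem.Chars.isIn [temp] "aeiouAEIOU".toList then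
                  PySem.Chars.upperChar temp else PySem.Chars.lowerChar temp]) [] =
    l.map aChar := by
  have hfun : (fun (res : List Char) i =>
      if ¬ PySem.Chars.isalpha i then
        res ++ [i]
      else
        let temp := if i = 'z' then 'a' else if i = 'Z' then 'A' else Char.ofNat (i.toNat + 1)
        res ++ [if PySem.Chars.isIn [temp] "aeiouAEIOU".toList then
                  PySem.Chars.upperChar temp else PySem.Chars.lowerChar temp]) =
      (fun res i => res ++ [aChar i]) := by
    funext res i
    by_cases h : PySem.Chars.isalpha i = true <;> simp [aChar, h]
  rw [hfun, PySem.List.foldl_append_singleton_eq_map]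
  simp

-- ===== VERDICT (by name: the statement is the Claim_ definition above) =====
set_option maxRecDepth 4000 in
theorem changer_spec : Claim_equal_changer := by
  intro s hdom
  unfold Spec_changer changer changer_alt
  rw [changer_eq_map]
  congr 1
  unfold Dom_changer pvDomStr at hdom
  rw [List.all_eq_true] at hdom
  exact List.map_congr_left (fun c hc => dom_char_eq c (hdom c hc))
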